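-- pv_equiv track=rewrite | github.com/uni-j-uni/CodingTest_Python | 프로그래머스/0/181926. 수 조작하기 1/수 조작하기 1.py | solution
-- ===== SOURCE A (Python) =====
-- def solution(n, control):
--     for word in control:
--         if word == 'w':
--             n += 1
--         elif word == 's':
--             n -= 1
--         elif word == 'd':
--             n += 10
--         else:
--             n -= 10
--     return n
-- ===== SOURCE B (Python) =====
-- def solution(n, control):
--     cs = list(control)
--     w, s, d = cs.count('w'), cs.count('s'), cs.count('d')
--     return n + w - s + 10 * d - 10 * (len(cs) - w - s - d)
-- ===== Notes on version B (the rewrite author's own statement) =====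
-- stated objective: simpler
-- what changed: Replaced the per-character accumulating if/elif loop by one count of each of 'w','s','d' and a single closed-form arithmetic expression, with the -10 bucket obtained as the complement count len - w - s - d.
import Mathlib
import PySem

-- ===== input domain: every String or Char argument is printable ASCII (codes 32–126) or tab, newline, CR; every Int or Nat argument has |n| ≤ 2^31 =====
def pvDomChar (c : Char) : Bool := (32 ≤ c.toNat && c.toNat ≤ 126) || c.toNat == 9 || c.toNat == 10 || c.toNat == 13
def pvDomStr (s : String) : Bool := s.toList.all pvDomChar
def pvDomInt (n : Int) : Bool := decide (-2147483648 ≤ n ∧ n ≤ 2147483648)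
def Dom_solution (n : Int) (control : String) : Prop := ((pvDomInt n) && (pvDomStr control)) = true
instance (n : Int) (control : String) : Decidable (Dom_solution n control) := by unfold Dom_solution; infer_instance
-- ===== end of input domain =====

-- B counts 'w','s','d' once and returns one closed-form expression instead of A's per-character if/elif loop (objective: simpler).
-- ===== PORT A =====
def solution (n : Int) (control : String) : Int :=
  control.toList.foldl (fun n word =>
    if word = 'w' then n + 1
    else if word = 's' then n - 1
    else if word = 'd' then n + 10
    else n - 10) n

-- ===== PORT B =====
def solution_alt (n : Int) (control : String) : Int :=
  let cs := control.toList
  let w : Int := PySem.List.count cs 'w'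
  let s : Int := PySem.List.count cs 's'
  let d : Int := PySem.List.count cs 'd'
  n + w - s + 10 * d - 10 * ((cs.length : Int) - w - s - d)

-- ===== PRECONDITION & SPEC =====
def Spec_solution (n : Int) (control : String) (out : Int) : Prop := out = solution_alt n control
instance (n : Int) (control : String) (out : Int) : Decidable (Spec_solution n control out) := by unfold Spec_solution; infer_instance

-- ===== CLAIM (what is proved, stated in full; the proofs are below) =====
def Claim_equal_solution : Prop := ∀ (n : Int) (control : String), Dom_solution n control → Spec_solution n control (solution n control)

-- ===== LEMMAS AND PROOFS =====

-- ===== VERDICT (by name: the statement is the Claim_ definition above) =====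
theorem solution_loop (l : List Char) : ∀ (n : Int),
    l.foldl (fun n word =>
      if word = 'w' then n + 1
      else if word = 's' then n - 1
      else if word = 'd' then n + 10
      else n - 10) n
    = n + (l.count 'w' : Int) - (l.count 's' : Int) + 10 * (l.count 'd' : Int)
        - 10 * ((l.length : Int) - (l.count 'w' : Int) - (l.count 's' : Int) - (l.count 'd' : Int)) := by
  induction l with
  | nil => intro n; simp
  | cons c l ih =>
    intro n
    simp only [List.foldl_cons, List.count_cons, List.length_cons, ih]
    by_cases hw : c = 'w' <;> by_cases hs : c = 's' <;> by_cases hd : c = 'd' <;>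
      simp_all <;> ring

theorem solution_spec : Claim_equal_solution := by
  intro n control _
  unfold Spec_solution solution solution_alt
  simp only [PySem.List.count_eq]
  exact solution_loop control.toList n
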